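-- pv_equiv track=rewrite | github.com/rwsargent/adventofcode | day5.py | has_double_letter_and_no_bad_pairs
-- ===== SOURCE A (Python) =====
-- def has_double_letter_and_no_bad_pairs(word):
--     naught_letters = ["ab", "cd", "pq", "xy"]
--     doubles = False
--     naughty_strings = False
--     for chrIdx in range(len(word)-1):
--         fst = word[chrIdx]
--         snd = word[chrIdx +1]
--         pair = fst + snd
--         if(fst == snd):
--             doubles = True
--         if pair in naught_letters:
--             naughty_strings = True
--     return doubles and not naughty_strings
-- ===== SOURCE B (Python) =====
-- def has_double_letter_and_no_bad_pairs(word):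
--     if any(bp in word for bp in ["ab", "cd", "pq", "xy"]):
--         return False
--     return any(word[i] == word[i + 1] for i in range(len(word) - 1))
-- ===== Notes on version B (the rewrite author's own statement) =====
-- stated objective: faster
-- what changed: A makes one index loop over the word, building every adjacent pair string and maintaining two flags; B instead searches each of the four bad patterns with substring containment (early-returning False on a hit) and separately tests adjacent equality with any(), moving the scan into C-level str search and short-circuiting.
import Mathlib
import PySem

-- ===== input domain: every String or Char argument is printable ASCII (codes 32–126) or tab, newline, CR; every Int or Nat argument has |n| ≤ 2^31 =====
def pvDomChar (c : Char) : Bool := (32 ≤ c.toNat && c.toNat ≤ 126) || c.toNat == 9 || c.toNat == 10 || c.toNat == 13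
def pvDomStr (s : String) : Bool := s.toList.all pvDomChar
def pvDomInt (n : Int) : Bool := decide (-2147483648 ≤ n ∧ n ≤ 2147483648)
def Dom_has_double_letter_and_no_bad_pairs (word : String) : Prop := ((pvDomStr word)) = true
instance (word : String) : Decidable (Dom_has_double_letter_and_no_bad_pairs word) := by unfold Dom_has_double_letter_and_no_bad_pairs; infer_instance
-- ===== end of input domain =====

-- B replaces A's single index loop maintaining two flags by a short-circuiting substring search
-- per bad pattern plus a separate adjacent-equality test (measured faster; same return value everywhere).

-- ===== PORT A =====
-- literal port of A; Python strings are handled as their char lists (pair = [fst, snd]);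
-- word[i] with i drawn from range(len(word)-1) is always in range, so pyGetD's default is never used
def has_double_letter_and_no_bad_pairs (word : String) : Bool :=
  let l := word.toList
  let naught_letters : List (List Char) := [['a','b'], ['c','d'], ['p','q'], ['x','y']]
  let res := (PySem.List.pyRange 0 ((l.length : Int) - 1) 1).foldl
    (fun (st : Bool × Bool) chrIdx =>
      let fst := PySem.List.pyGetD l chrIdx ' '
      let snd := PySem.List.pyGetD l (chrIdx + 1) ' '
      let pair := [fst, snd]
      let st := if fst == snd then (true, st.2) else st
      if naught_letters.contains pair then (st.1, true) else st)
    (false, false)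
  res.1 && !res.2

-- ===== PORT B =====
def has_double_letter_and_no_bad_pairs_alt (word : String) : Bool :=
  if (["ab", "cd", "pq", "xy"] : List String).any (fun bp => PySem.Str.isIn bp word) then
    false
  else
    let l := word.toList
    (PySem.List.pyRange 0 ((l.length : Int) - 1) 1).any
      (fun i => PySem.List.pyGetD l i ' ' == PySem.List.pyGetD l (i + 1) ' ')

-- ===== PRECONDITION & SPEC =====
def Spec_has_double_letter_and_no_bad_pairs (word : String) (out : Bool) : Prop := out = has_double_letter_and_no_bad_pairs_alt word
instance (word : String) (out : Bool) : Decidable (Spec_has_double_letter_and_no_bad_pairs word out) := by unfold Spec_has_double_letter_and_no_bad_pairs; infer_instance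

-- ===== CLAIM (what is proved, stated in full; the proofs are below) =====
def Claim_equal_has_double_letter_and_no_bad_pairs : Prop := ∀ (word : String), Dom_has_double_letter_and_no_bad_pairs word → Spec_has_double_letter_and_no_bad_pairs word (has_double_letter_and_no_bad_pairs word)

-- ===== LEMMAS AND PROOFS =====

-- the adjacent-pairs view: both loops range over range(len(l)-1) reading l[i], l[i+1]
def pvPairs (l : List Char) : List (Char × Char) := l.zip l.tail

lemma pvRange_map_eq_pairs (l : List Char) :
    (PySem.List.pyRange 0 ((l.length : Int) - 1) 1).map
      (fun i => (PySem.List.pyGetD l i ' ', PySem.List.pyGetD l (i + 1) ' ')) = pvPairs l := by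
  apply List.ext_getElem
  · simp [pvPairs, PySem.List.length_pyRange_one]
  · intro k h1 h2
    have hk : k < l.length - 1 := by
      simpa [PySem.List.length_pyRange_one] using h1
    have hk1 : k < l.length := by omega
    have hk2 : k + 1 < l.length := by omega
    rw [List.getElem_map, PySem.List.getElem_pyRange_one]
    have e2 : ((k : Int) + 1) = (((k + 1 : Nat)) : Int) := by push_cast; ring
    rw [show (0 : Int) + (k : Int) = ((k : Nat) : Int) from by ring, e2,
      PySem.List.pyGetD_natCast, PySem.List.pyGetD_natCast]
    simp [pvPairs, List.getElem_zip, List.getElem_tail, List.getD_eq_getElem?_getD,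
      List.getElem?_eq_getElem hk1, List.getElem?_eq_getElem hk2]

-- A's fold over the adjacent pairs accumulates exactly the two 'any's
lemma pvFoldA (P : List (Char × Char)) (naught : List (List Char)) (d n : Bool) :
    P.foldl
      (fun (st : Bool × Bool) p =>
        let st := if p.1 == p.2 then (true, st.2) else st
        if naught.contains [p.1, p.2] then (st.1, true) else st)
      (d, n)
    = (d || P.any (fun p => p.1 == p.2), n || P.any (fun p => naught.contains [p.1, p.2])) := by
  induction P generalizing d n with
  | nil => simp
  | cons p P ih =>
    simp only [List.foldl_cons, List.any_cons]
    split_ifs with hn he he <;> rw [ih] <;>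
      simp only [List.contains_eq_mem] at hn <;>
      simp [he, hn]

-- a two-character pattern is a substring iff it occurs as an adjacent pair
lemma pvInfix_pair (x y : Char) (l : List Char) :
    ([x, y] <:+: l) ↔ (x, y) ∈ pvPairs l := by
  induction l with
  | nil => simp [pvPairs]
  | cons c l ih =>
    rw [List.infix_cons_iff]
    cases l with
    | nil =>
      constructor
      · rintro (h | h)
        · have := h.length_le; simp at this
        · have := h.length_le; simp at this
      · intro h; simp [pvPairs] at h
    | cons c' l' =>
      constructor
      · rintro (h | h)
        · rcases h with ⟨t, ht⟩
          simp only [List.cons_append, List.cons.injEq] at ht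
          obtain ⟨rfl, rfl, -⟩ := ht
          simp [pvPairs]
        · have := ih.mp h
          simp only [pvPairs, List.tail_cons] at this ⊢
          simp [List.zip_cons_cons, this]
      · intro h
        simp only [pvPairs, List.tail_cons, List.zip_cons_cons, List.mem_cons] at h
        rcases h with h | h
        · rw [Prod.mk.injEq] at h
          obtain ⟨rfl, rfl⟩ := h
          exact Or.inl ⟨l', rfl⟩
        · exact Or.inr (ih.mpr (by simpa [pvPairs] using h))

-- B's pattern-by-pattern substring search equals A's membership test over the adjacent pairs
lemma pvBad_eq (word : String) :
    ((["ab", "cd", "pq", "xy"] : List String).any (fun bp => PySem.Str.isIn bp word))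
    = (pvPairs word.toList).any
        (fun p => ([['a','b'], ['c','d'], ['p','q'], ['x','y']] : List (List Char)).contains [p.1, p.2]) := by
  have key : ∀ (x y : Char), PySem.Chars.isIn [x, y] word.toList = decide ((x, y) ∈ pvPairs word.toList) := by
    intro x y
    by_cases h : (x, y) ∈ pvPairs word.toList
    · simp [h, PySem.Chars.isIn_iff_infix, (pvInfix_pair x y word.toList).mpr h]
    · simp only [h, decide_false]
      rw [PySem.Chars.isIn_eq_false_iff]
      exact fun hc => h ((pvInfix_pair x y word.toList).mp hc)
  have hab : ("ab" : String).toList = ['a','b'] := rfl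
  have hcd : ("cd" : String).toList = ['c','d'] := rfl
  have hpq : ("pq" : String).toList = ['p','q'] := rfl
  have hxy : ("xy" : String).toList = ['x','y'] := rfl
  simp only [List.any_cons, List.any_nil, PySem.Str.isIn_eq, hab, hcd, hpq, hxy, key]
  rw [Bool.eq_iff_iff]
  simp only [Bool.or_eq_true, decide_eq_true_eq, List.any_eq_true, List.contains_eq_mem,
    List.mem_cons, List.not_mem_nil, or_false, decide_eq_true_eq, Bool.false_eq_true]
  constructor
  · rintro (h | h | h | h)
    · exact ⟨('a','b'), h, by simp⟩
    · exact ⟨('c','d'), h, by simp⟩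
    · exact ⟨('p','q'), h, by simp⟩
    · exact ⟨('x','y'), h, by simp⟩
  · rintro ⟨⟨a, b⟩, hp, h⟩
    rcases h with h | h | h | h <;> simp at h <;> obtain ⟨rfl, rfl⟩ := h <;> tauto

-- ===== VERDICT (by name: the statement is the Claim_ definition above) =====
theorem has_double_letter_and_no_bad_pairs_spec : Claim_equal_has_double_letter_and_no_bad_pairs := by
  intro word _
  have hmap := pvRange_map_eq_pairs word.toList
  have hfold :
      (PySem.List.pyRange 0 ((word.toList.length : Int) - 1) 1).foldl
        (fun (st : Bool × Bool) chrIdx =>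
          let fst := PySem.List.pyGetD word.toList chrIdx ' '
          let snd := PySem.List.pyGetD word.toList (chrIdx + 1) ' '
          let pair := [fst, snd]
          let st := if fst == snd then (true, st.2) else st
          if ([['a','b'], ['c','d'], ['p','q'], ['x','y']] : List (List Char)).contains pair then (st.1, true) else st)
        (false, false)
      = ((pvPairs word.toList).any (fun p => p.1 == p.2),
         (pvPairs word.toList).any
           (fun p => ([['a','b'], ['c','d'], ['p','q'], ['x','y']] : List (List Char)).contains [p.1, p.2])) := by
    have h1 :
        (pvPairs word.toList).foldl
          (fun (st : Bool × Bool) p =>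
            let st := if p.1 == p.2 then (true, st.2) else st
            if ([['a','b'], ['c','d'], ['p','q'], ['x','y']] : List (List Char)).contains [p.1, p.2] then (st.1, true) else st)
          (false, false)
        = (PySem.List.pyRange 0 ((word.toList.length : Int) - 1) 1).foldl
            (fun (st : Bool × Bool) chrIdx =>
              let fst := PySem.List.pyGetD word.toList chrIdx ' '
              let snd := PySem.List.pyGetD word.toList (chrIdx + 1) ' '
              let pair := [fst, snd]
              let st := if fst == snd then (true, st.2) else st
              if ([['a','b'], ['c','d'], ['p','q'], ['x','y']] : List (List Char)).contains pair then (st.1, true) else st)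
            (false, false) := by
      rw [← hmap, List.foldl_map]
    rw [← h1, pvFoldA]
    simp
  have hany :
      (PySem.List.pyRange 0 ((word.toList.length : Int) - 1) 1).any
        (fun i => PySem.List.pyGetD word.toList i ' ' == PySem.List.pyGetD word.toList (i + 1) ' ')
      = (pvPairs word.toList).any (fun p => p.1 == p.2) := by
    rw [← hmap, List.any_map]
    rfl
  show
      (((PySem.List.pyRange 0 ((word.toList.length : Int) - 1) 1).foldl
        (fun (st : Bool × Bool) chrIdx =>
          let fst := PySem.List.pyGetD word.toList chrIdx ' '
          let snd := PySem.List.pyGetD word.toList (chrIdx + 1) ' '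
          let pair := [fst, snd]
          let st := if fst == snd then (true, st.2) else st
          if ([['a','b'], ['c','d'], ['p','q'], ['x','y']] : List (List Char)).contains pair then (st.1, true) else st)
        (false, false)).1
       && !((PySem.List.pyRange 0 ((word.toList.length : Int) - 1) 1).foldl
        (fun (st : Bool × Bool) chrIdx =>
          let fst := PySem.List.pyGetD word.toList chrIdx ' '
          let snd := PySem.List.pyGetD word.toList (chrIdx + 1) ' '
          let pair := [fst, snd]
          let st := if fst == snd then (true, st.2) else st
          if ([['a','b'], ['c','d'], ['p','q'], ['x','y']] : List (List Char)).contains pair then (st.1, true) else st)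
        (false, false)).2)
      = (if (["ab", "cd", "pq", "xy"] : List String).any (fun bp => PySem.Str.isIn bp word) then
          false
        else
          (PySem.List.pyRange 0 ((word.toList.length : Int) - 1) 1).any
            (fun i => PySem.List.pyGetD word.toList i ' ' == PySem.List.pyGetD word.toList (i + 1) ' '))
  rw [hfold, hany, pvBad_eq]
  cases (pvPairs word.toList).any
      (fun p => ([['a','b'], ['c','d'], ['p','q'], ['x','y']] : List (List Char)).contains [p.1, p.2]) <;>
    simp
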